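-- pv_equiv track=rewrite | github.com/ohjw2077/Automation | BOM_Verification_Tool_1.0.py | formatting
-- ===== SOURCE A (Python) =====
-- def formatting(names):
--     # 필요 없는 공백 삭제
--     names = names.split(" ")
--     names = [i for i in names if i != ""]
--     names = " ".join(names)
--
--     # hyphen 앞뒤로 blank 있을 시 blank 삭제
--     if "- " in names:
--         names = names.replace("- ", "-")
--     if " -" in names:
--         names = names.replace(" -", "-")
--     return names
-- ===== SOURCE B (Python) =====
-- def formatting(names):
--     out = []
--     pending = False  # a space is waiting to be emitted
--     for ch in names:
--         if ch == " ":
--             if out:          # drop leading spaces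
--                 pending = True
--         elif ch == "-":
--             pending = False  # drop space before hyphen
--             out.append("-")
--         else:
--             if pending and out[-1] != "-":
--                 out.append(" ")
--             pending = False
--             out.append(ch)
--     return "".join(out)
-- ===== Notes on version B (the rewrite author's own statement) =====
-- stated objective: alternative
-- what changed: Replaces A's five passes (split on ' ', filter empties, join, then two guarded global str.replace passes for '- ' and ' -') with a single left-to-right character scan that keeps a pending-space flag and the last emitted character, collapsing space runs, trimming ends, and dropping a space adjacent to a hyphen as it goes.
import Mathlib
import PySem

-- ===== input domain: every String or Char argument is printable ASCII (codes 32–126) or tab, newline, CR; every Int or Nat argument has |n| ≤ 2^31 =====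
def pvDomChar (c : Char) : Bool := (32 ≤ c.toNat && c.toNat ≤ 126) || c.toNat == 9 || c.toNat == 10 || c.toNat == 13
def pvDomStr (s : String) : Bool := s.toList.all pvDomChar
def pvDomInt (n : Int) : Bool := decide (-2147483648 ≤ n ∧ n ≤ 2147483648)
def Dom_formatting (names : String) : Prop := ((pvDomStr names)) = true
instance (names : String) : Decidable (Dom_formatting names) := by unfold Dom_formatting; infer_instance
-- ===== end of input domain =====

-- B replaces A's split/filter/join plus two str.replace passes by ONE stateful left-to-right scan (alternative decomposition, same O(n) cost).

-- ===== PORT A =====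
def formatting (names : String) : String :=
  -- names = names.split(" "); names = [i for i in names if i != ""]; names = " ".join(names)
  let names1 := (PySem.Str.split? names " ").getD []
  let names2 := names1.filter (fun i => i ≠ "")
  let names3 := PySem.Str.join " " names2
  -- if "- " in names: names = names.replace("- ", "-")
  let names4 := if PySem.Str.isIn "- " names3 then PySem.Str.replace names3 "- " "-" else names3
  -- if " -" in names: names = names.replace(" -", "-")
  let names5 := if PySem.Str.isIn " -" names4 then PySem.Str.replace names4 " -" "-" else names4
  names5

-- ===== PORT B =====
-- one step of Source B's loop body; state = (out, pending)
def altStep (st : List Char × Bool) (c : Char) : List Char × Bool :=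
  if c = ' ' then (st.1, if st.1 ≠ [] then true else st.2)
  else if c = '-' then (st.1 ++ ['-'], false)
  else if st.2 = true ∧ st.1.getLast? ≠ some '-' then (st.1 ++ [' ', c], false)
  else (st.1 ++ [c], false)

def formatting_alt (names : String) : String :=
  String.ofList (names.toList.foldl altStep ([], false)).1

-- ===== PRECONDITION & SPEC =====
def Spec_formatting (names : String) (out : String) : Prop := out = formatting_alt names
instance (names : String) (out : String) : Decidable (Spec_formatting names out) := by unfold Spec_formatting; infer_instance

-- ===== CLAIM (what is proved, stated in full; the proofs are below) =====
def Claim_equal_formatting : Prop := ∀ (names : String), Dom_formatting names → Spec_formatting names (formatting names)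

-- ===== LEMMAS AND PROOFS =====

-- Python's s.split(" ") as a structural recursion
def pysplit : List Char → List (List Char)
  | [] => [[]]
  | c :: t =>
    if c = ' ' then [] :: pysplit t
    else match pysplit t with
      | [] => [[c]]
      | w :: ws => (c :: w) :: ws

-- the nonempty tokens
def words (cs : List Char) : List (List Char) := (pysplit cs).filter (fun w => w ≠ [])

-- separator emitted between two adjacent tokens in the final result
def sepOf (a b : List Char) : List Char :=
  if a.getLast? = some '-' ∨ b.head? = some '-' then [] else [' ']

-- the common specification value: tokens joined, spaces adjacent to hyphens dropped
def glue : List (List Char) → List Char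
  | [] => []
  | [w] => w
  | w :: v :: ws => w ++ sepOf w v ++ glue (v :: ws)

-- value after A's first replace only ("- " -> "-")
def glue1 : List (List Char) → List Char
  | [] => []
  | [w] => w
  | w :: v :: ws => w ++ (if w.getLast? = some '-' then [] else [' ']) ++ glue1 (v :: ws)

-- s.replace("- ", "-") as a structural recursion
def rep1 : List Char → List Char
  | [] => []
  | [c] => [c]
  | c :: d :: t => if c = '-' ∧ d = ' ' then '-' :: rep1 t else c :: rep1 (d :: t)

-- s.replace(" -", "-") as a structural recursion
def rep2 : List Char → List Char
  | [] => []
  | [c] => [c]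
  | c :: d :: t => if c = ' ' ∧ d = '-' then '-' :: rep2 t else c :: rep2 (d :: t)

-- B's machine as output-producing recursion: run (last emitted char) (pending) (input)
def run : Option Char → Bool → List Char → List Char
  | _, _, [] => []
  | none, _, c :: t => if c = ' ' then run none false t else c :: run (some c) false t
  | some x, pend, c :: t =>
    if c = ' ' then run (some x) true t
    else if c = '-' then '-' :: run (some '-') false t
    else if pend = true ∧ x ≠ '-' then ' ' :: c :: run (some c) false t
    else c :: run (some c) false t

-- separator emitted before the first token of the remainder, after char x with a pending space
def sepX (x : Char) : List (List Char) → List Char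
  | [] => []
  | w :: _ => if x = '-' ∨ w.head? = some '-' then [] else [' ']

theorem pysplit_ne_nil (cs : List Char) : pysplit cs ≠ [] := by
  cases cs with
  | nil => simp [pysplit]
  | cons c t =>
    simp only [pysplit]
    split
    · simp
    · split <;> simp


theorem words_nil : words [] = [] := by simp [words, pysplit]

theorem words_space (t : List Char) : words (' ' :: t) = words t := by
  simp [words, pysplit]

theorem words_single (c : Char) (hc : c ≠ ' ') : words [c] = [[c]] := by
  simp [words, pysplit, hc]

theorem words_c_space (c : Char) (t : List Char) (hc : c ≠ ' ') :
    words (c :: ' ' :: t) = [c] :: words t := by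
  simp [words, pysplit, hc]

theorem words_cons_shape (c : Char) (t : List Char) (hc : c ≠ ' ') :
    ∃ w ws, words (c :: t) = (c :: w) :: ws := by
  rcases h : pysplit t with _ | ⟨w, ws⟩
  · exact absurd h (pysplit_ne_nil t)
  · exact ⟨w, ws.filter (fun w => w ≠ []), by simp [words, pysplit, hc, h]⟩

theorem words_cc (c d : Char) (t : List Char) (hc : c ≠ ' ') (hd : d ≠ ' ')
    (w : List Char) (ws : List (List Char)) (h : words (d :: t) = w :: ws) :
    words (c :: d :: t) = (c :: w) :: ws := by
  rcases hp : pysplit t with _ | ⟨w', ws'⟩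
  · exact absurd hp (pysplit_ne_nil t)
  · have h1 : words (d :: t) = (d :: w') :: ws'.filter (fun w => w ≠ []) := by
      simp [words, pysplit, hd, hp]
    rw [h1] at h
    injection h with e1 e2
    have h2 : words (c :: d :: t) = (c :: d :: w') :: ws'.filter (fun w => w ≠ []) := by
      simp [words, pysplit, hc, hd, hp]
    rw [h2, ← e1, ← e2]

theorem pysplit_nospace : ∀ (cs : List Char), ∀ w ∈ pysplit cs, ' ' ∉ w := by
  intro cs
  induction cs with
  | nil => simp [pysplit]
  | cons c t ih =>
    intro w hw
    by_cases hc : c = ' '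
    · simp only [pysplit, if_pos hc, List.mem_cons] at hw
      rcases hw with h | h
      · simp [h]
      · exact ih w h
    · simp only [pysplit, if_neg hc] at hw
      rcases hp : pysplit t with _ | ⟨w', ws'⟩
      · simp [hp] at hw
        simp only [hw, List.mem_singleton]
        exact fun h => hc h.symm
      · simp [hp] at hw
        rcases hw with h | h
        · subst h
          intro hmem
          rcases List.mem_cons.1 hmem with h | h
          · exact hc h.symm
          · exact ih w' (hp ▸ List.mem_cons_self ..) h
        · exact ih w (hp ▸ List.mem_cons_of_mem _ h)

theorem words_prop (cs : List Char) : ∀ w ∈ words cs, w ≠ [] ∧ ' ' ∉ w := by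
  intro w hw
  rw [words, List.mem_filter] at hw
  refine ⟨by simpa using hw.2, pysplit_nospace cs w hw.1⟩

theorem splitOn_go_eq : ∀ (fuel : Nat) (l cur : List Char) (acc : List (List Char)),
    l.length ≤ fuel →
    PySem.Chars.splitOn.go [' '] fuel l cur acc =
      acc.reverse ++ (match pysplit l with
        | [] => []
        | w :: ws => (cur.reverse ++ w) :: ws) := by
  intro fuel
  induction fuel with
  | zero =>
    intro l cur acc hl
    have : l = [] := List.length_eq_zero_iff.1 (Nat.le_zero.1 hl)
    subst this
    simp [PySem.Chars.splitOn.go, pysplit]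
  | succ f ih =>
    intro l cur acc hl
    cases l with
    | nil => simp [PySem.Chars.splitOn.go, pysplit]
    | cons c rest =>
      by_cases hc : c = ' '
      · subst hc
        have h1 : PySem.Chars.splitOn.go [' '] (f+1) (' '::rest) cur acc
            = PySem.Chars.splitOn.go [' '] f rest [] (cur.reverse :: acc) := by
          simp [PySem.Chars.splitOn.go]
        rw [h1, ih rest [] (cur.reverse :: acc) (by simp at hl; omega)]
        rcases hp : pysplit rest with _ | ⟨w, ws⟩
        · exact absurd hp (pysplit_ne_nil rest)
        · simp [pysplit, hp]
      · have h1 : PySem.Chars.splitOn.go [' '] (f+1) (c::rest) cur acc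
            = PySem.Chars.splitOn.go [' '] f rest (c :: cur) acc := by
          simp only [PySem.Chars.splitOn.go, List.isPrefixOf]
          split
          · rename_i hpre
            simp at hpre
            exact absurd hpre.symm hc
          · rfl
        rw [h1, ih rest (c :: cur) acc (by simpa using hl)]
        rcases hp : pysplit rest with _ | ⟨w, ws⟩
        · exact absurd hp (pysplit_ne_nil rest)
        · simp [pysplit, hc, hp]

theorem splitOn_eq_pysplit (cs : List Char) :
    PySem.Chars.splitOn cs [' '] = pysplit cs := by
  rw [PySem.Chars.splitOn, splitOn_go_eq (cs.length + 1) cs [] [] (by omega)]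
  rcases hp : pysplit cs with _ | ⟨w, ws⟩
  · exact absurd hp (pysplit_ne_nil cs)
  · simp


theorem rep1_cons (c : Char) (l : List Char) (h : ¬(c = '-' ∧ l.head? = some ' ')) :
    rep1 (c :: l) = c :: rep1 l := by
  cases l with
  | nil => simp [rep1]
  | cons d t =>
    rw [rep1, if_neg]
    intro hx
    exact h ⟨hx.1, by simp [hx.2]⟩

theorem rep2_cons (c : Char) (l : List Char) (h : ¬(c = ' ' ∧ l.head? = some '-')) :
    rep2 (c :: l) = c :: rep2 l := by
  cases l with
  | nil => simp [rep2]
  | cons d t =>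
    rw [rep2, if_neg]
    intro hx
    exact h ⟨hx.1, by simp [hx.2]⟩

theorem rep1_go_eq : ∀ (fuel : Nat) (l acc : List Char), l.length ≤ fuel →
    PySem.Chars.replace.go ['-', ' '] ['-'] fuel l acc = acc.reverse ++ rep1 l := by
  intro fuel
  induction fuel with
  | zero =>
    intro l acc hl
    have : l = [] := List.length_eq_zero_iff.1 (Nat.le_zero.1 hl)
    subst this
    simp [PySem.Chars.replace.go, rep1]
  | succ f ih =>
    intro l acc hl
    cases l with
    | nil => simp [PySem.Chars.replace.go, rep1]
    | cons c t =>
      cases t with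
      | nil =>
        have h1 : PySem.Chars.replace.go ['-', ' '] ['-'] (f+1) [c] acc
            = PySem.Chars.replace.go ['-', ' '] ['-'] f [] (c :: acc) := by
          simp [PySem.Chars.replace.go, List.isPrefixOf]
        rw [h1, ih [] (c :: acc) (by simp)]
        simp [rep1]
      | cons d t' =>
        by_cases hm : c = '-' ∧ d = ' '
        · obtain ⟨hc, hd⟩ := hm
          subst hc; subst hd
          have h1 : PySem.Chars.replace.go ['-', ' '] ['-'] (f+1) ('-' :: ' ' :: t') acc
              = PySem.Chars.replace.go ['-', ' '] ['-'] f t' ('-' :: acc) := by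
            simp [PySem.Chars.replace.go, List.isPrefixOf]
          rw [h1, ih t' _ (by simp at hl; omega)]
          simp [rep1]
        · have h1 : PySem.Chars.replace.go ['-', ' '] ['-'] (f+1) (c :: d :: t') acc
              = PySem.Chars.replace.go ['-', ' '] ['-'] f (d :: t') (c :: acc) := by
            simp only [PySem.Chars.replace.go, List.isPrefixOf]
            split
            · rename_i hpre
              simp at hpre
              exact absurd ⟨hpre.1.symm, hpre.2.symm⟩ hm
            · rfl
          rw [h1, ih (d :: t') _ (by simp at hl ⊢; omega)]
          rw [rep1, if_neg hm]
          simp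

theorem rep2_go_eq : ∀ (fuel : Nat) (l acc : List Char), l.length ≤ fuel →
    PySem.Chars.replace.go [' ', '-'] ['-'] fuel l acc = acc.reverse ++ rep2 l := by
  intro fuel
  induction fuel with
  | zero =>
    intro l acc hl
    have : l = [] := List.length_eq_zero_iff.1 (Nat.le_zero.1 hl)
    subst this
    simp [PySem.Chars.replace.go, rep2]
  | succ f ih =>
    intro l acc hl
    cases l with
    | nil => simp [PySem.Chars.replace.go, rep2]
    | cons c t =>
      cases t with
      | nil =>
        have h1 : PySem.Chars.replace.go [' ', '-'] ['-'] (f+1) [c] acc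
            = PySem.Chars.replace.go [' ', '-'] ['-'] f [] (c :: acc) := by
          simp [PySem.Chars.replace.go, List.isPrefixOf]
        rw [h1, ih [] (c :: acc) (by simp)]
        simp [rep2]
      | cons d t' =>
        by_cases hm : c = ' ' ∧ d = '-'
        · obtain ⟨hc, hd⟩ := hm
          subst hc; subst hd
          have h1 : PySem.Chars.replace.go [' ', '-'] ['-'] (f+1) (' ' :: '-' :: t') acc
              = PySem.Chars.replace.go [' ', '-'] ['-'] f t' ('-' :: acc) := by
            simp [PySem.Chars.replace.go, List.isPrefixOf]
          rw [h1, ih t' _ (by simp at hl; omega)]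
          simp [rep2]
        · have h1 : PySem.Chars.replace.go [' ', '-'] ['-'] (f+1) (c :: d :: t') acc
              = PySem.Chars.replace.go [' ', '-'] ['-'] f (d :: t') (c :: acc) := by
            simp only [PySem.Chars.replace.go, List.isPrefixOf]
            split
            · rename_i hpre
              simp at hpre
              exact absurd ⟨hpre.1.symm, hpre.2.symm⟩ hm
            · rfl
          rw [h1, ih (d :: t') _ (by simp at hl ⊢; omega)]
          rw [rep2, if_neg hm]
          simp

theorem replace1_eq (l : List Char) : PySem.Chars.replace l ['-', ' '] ['-'] = rep1 l := by
  rw [PySem.Chars.replace]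
  simpa using rep1_go_eq l.length l [] le_rfl

theorem replace2_eq (l : List Char) : PySem.Chars.replace l [' ', '-'] ['-'] = rep2 l := by
  rw [PySem.Chars.replace]
  simpa using rep2_go_eq l.length l [] le_rfl

theorem rep1_id_of_no : ∀ (l : List Char), ¬ (['-', ' '] <:+: l) → rep1 l = l := by
  intro l
  induction l using rep1.induct with
  | case1 => simp [rep1]
  | case2 c => simp [rep1]
  | case3 c d t hm ih =>
    intro h
    obtain ⟨hc, hd⟩ := hm
    subst hc; subst hd
    exact absurd ⟨[], t, by simp⟩ h
  | case4 c d t hm ih =>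
    intro h
    rw [rep1, if_neg hm, ih]
    intro hi
    obtain ⟨s, u, hsu⟩ := hi
    exact h ⟨c :: s, u, by simp [hsu]⟩

theorem rep2_id_of_no : ∀ (l : List Char), ¬ ([' ', '-'] <:+: l) → rep2 l = l := by
  intro l
  induction l using rep2.induct with
  | case1 => simp [rep2]
  | case2 c => simp [rep2]
  | case3 c d t hm ih =>
    intro h
    obtain ⟨hc, hd⟩ := hm
    subst hc; subst hd
    exact absurd ⟨[], t, by simp⟩ h
  | case4 c d t hm ih =>
    intro h
    rw [rep2, if_neg hm, ih]
    intro hi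
    obtain ⟨s, u, hsu⟩ := hi
    exact h ⟨c :: s, u, by simp [hsu]⟩


theorem rep1_app : ∀ (w rest : List Char), ' ' ∉ w →
    ¬(w.getLast? = some '-' ∧ rest.head? = some ' ') →
    rep1 (w ++ rest) = w ++ rep1 rest := by
  intro w
  induction w with
  | nil => intro rest _ _; simp
  | cons a w' ih =>
    intro rest hs hne
    cases w' with
    | nil =>
      have h1 : rep1 (a :: rest) = a :: rep1 rest := by
        apply rep1_cons
        intro hx
        exact hne ⟨by simp [hx.1], hx.2⟩
      simpa using h1
    | cons b w'' =>
      have hb : b ≠ ' ' := fun hb => hs (by simp [hb])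
      have h1 : rep1 (a :: ((b :: w'') ++ rest)) = a :: rep1 ((b :: w'') ++ rest) := by
        apply rep1_cons
        intro hx
        exact hb (by simpa using hx.2)
      rw [List.getLast?_cons_cons] at hne
      have h2 := ih rest (fun hm => hs (List.mem_cons_of_mem _ hm)) hne
      simp only [List.cons_append] at h1 h2 ⊢
      rw [h1, h2]

theorem rep1_app_hyp : ∀ (w r : List Char), ' ' ∉ w → w.getLast? = some '-' →
    rep1 (w ++ ' ' :: r) = w ++ rep1 r := by
  intro w
  induction w with
  | nil => intro r _ h; simp at h
  | cons a w' ih =>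
    intro r hs hl
    cases w' with
    | nil =>
      simp at hl
      subst hl
      simp [rep1]
    | cons b w'' =>
      have hb : b ≠ ' ' := fun hb => hs (by simp [hb])
      rw [List.getLast?_cons_cons] at hl
      have h1 : rep1 (a :: ((b :: w'') ++ ' ' :: r)) = a :: rep1 ((b :: w'') ++ ' ' :: r) := by
        apply rep1_cons
        intro hx
        exact hb (by simpa using hx.2)
      have h2 := ih r (fun hm => hs (List.mem_cons_of_mem _ hm)) hl
      simp only [List.cons_append] at h1 h2 ⊢
      rw [h1, h2]

theorem rep2_app : ∀ (w rest : List Char), ' ' ∉ w →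
    rep2 (w ++ rest) = w ++ rep2 rest := by
  intro w
  induction w with
  | nil => intro rest _; simp
  | cons a w' ih =>
    intro rest hs
    have ha : a ≠ ' ' := fun ha => hs (by simp [ha])
    have h1 : rep2 (a :: (w' ++ rest)) = a :: rep2 (w' ++ rest) := by
      apply rep2_cons
      intro hx
      exact ha hx.1
    have h2 := ih rest (fun hm => hs (List.mem_cons_of_mem _ hm))
    simp only [List.cons_append] at h1 h2 ⊢
    rw [h1, h2]

theorem rep1_join : ∀ (ws : List (List Char)), (∀ w ∈ ws, w ≠ [] ∧ ' ' ∉ w) →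
    rep1 (PySem.Chars.join [' '] ws) = glue1 ws := by
  intro ws
  induction ws with
  | nil => intro _; simp [PySem.Chars.join_nil, rep1, glue1]
  | cons w vs ih =>
    intro h
    have hsw : ' ' ∉ w := (h w (by simp)).2
    cases vs with
    | nil =>
      rw [PySem.Chars.join_singleton]
      have h1 := rep1_app w [] hsw (by simp)
      simpa [glue1, rep1] using h1
    | cons v vs' =>
      have hih := ih (fun u hu => h u (List.mem_cons_of_mem _ hu))
      have hj : PySem.Chars.join [' '] (w :: v :: vs')
          = w ++ (' ' :: PySem.Chars.join [' '] (v :: vs')) := by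
        simp [PySem.Chars.join_cons_cons]
      rw [hj]
      by_cases hlw : w.getLast? = some '-'
      · rw [rep1_app_hyp w _ hsw hlw, hih, glue1, if_pos hlw]
        simp
      · rw [rep1_app w _ hsw (by simp [hlw])]
        have h2 : rep1 (' ' :: PySem.Chars.join [' '] (v :: vs'))
            = ' ' :: rep1 (PySem.Chars.join [' '] (v :: vs')) := by
          apply rep1_cons
          simp
        rw [h2, hih, glue1, if_neg hlw]
        simp

theorem glue1_cons_decomp (v : List Char) (ws : List (List Char)) :
    ∃ r, glue1 (v :: ws) = v ++ r := by
  cases ws with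
  | nil => exact ⟨[], by simp [glue1]⟩
  | cons u ws' =>
    refine ⟨(if v.getLast? = some '-' then [] else [' ']) ++ glue1 (u :: ws'), ?_⟩
    rw [glue1]
    simp

theorem rep2_glue1 : ∀ (ws : List (List Char)), (∀ w ∈ ws, w ≠ [] ∧ ' ' ∉ w) →
    rep2 (glue1 ws) = glue ws := by
  intro ws
  induction ws with
  | nil => intro _; simp [glue1, glue, rep2]
  | cons w vs ih =>
    intro h
    have hsw : ' ' ∉ w := (h w (by simp)).2
    cases vs with
    | nil =>
      have h1 := rep2_app w [] hsw
      simpa [glue1, glue, rep2] using h1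
    | cons v vs' =>
      obtain ⟨r, hr⟩ := glue1_cons_decomp v vs'
      have hv : v ≠ [] := (h v (by simp)).1
      have hsv : ' ' ∉ v := (h v (by simp)).2
      have hih := ih (fun u hu => h u (List.mem_cons_of_mem _ hu))
      rw [glue1]
      by_cases hlw : w.getLast? = some '-'
      · rw [if_pos hlw]
        simp only [List.append_nil]
        rw [rep2_app w _ hsw, hih, glue]
        have : sepOf w v = [] := by simp [sepOf, hlw]
        rw [this]
        simp
      · rw [if_neg hlw]
        have hassoc : w ++ [' '] ++ glue1 (v :: vs') = w ++ (' ' :: glue1 (v :: vs')) := by simp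
        rw [hassoc, rep2_app w _ hsw]
        cases v with
        | nil => exact absurd rfl hv
        | cons e v'' =>
          have hsv'' : ' ' ∉ v'' := fun hm => hsv (List.mem_cons_of_mem _ hm)
          by_cases he : e = '-'
          · subst he
            rw [hr]
            have h3 : rep2 (' ' :: (('-' :: v'') ++ r)) = '-' :: rep2 (v'' ++ r) := by
              simp [rep2]
            rw [h3, rep2_app v'' r hsv'']
            have h4 : ('-' :: v'') ++ rep2 r = glue (('-' :: v'') :: vs') := by
              rw [← hih, hr, rep2_app ('-' :: v'') r hsv]
            rw [glue]
            have : sepOf w ('-' :: v'') = [] := by simp [sepOf]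
            rw [this, ← h4]
            simp
          · rw [hr]
            have h3 : rep2 (' ' :: ((e :: v'') ++ r)) = ' ' :: rep2 ((e :: v'') ++ r) := by
              apply rep2_cons
              intro hx
              exact he (by simpa using hx.2)
            rw [h3, ← hr, hih, glue]
            have : sepOf w (e :: v'') = [' '] := by simp [sepOf, hlw, he]
            rw [this]
            simp


theorem ofList_ne_empty_iff (w : List Char) : (String.ofList w ≠ "") ↔ (w ≠ []) := by
  have h : (String.ofList w = "") ↔ (w = []) := by
    rw [← String.toList_inj]
    simp
  exact not_congr h

theorem formatting_toList (names : String) :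
    (formatting names).toList = glue (words names.toList) := by
  have hsplit : (PySem.Str.split? names " ").getD [] = (pysplit names.toList).map String.ofList := by
    simp [PySem.Str.split?, PySem.Chars.split?, splitOn_eq_pysplit]
  have hfilter : ((pysplit names.toList).map String.ofList).filter (fun i => i ≠ "")
      = (words names.toList).map String.ofList := by
    rw [words, List.filter_map]
    congr 1
    apply List.filter_congr
    intro w _
    simp [Function.comp, ofList_ne_empty_iff w]
  have hjoin : (PySem.Str.join " " ((words names.toList).map String.ofList)).toList
      = PySem.Chars.join [' '] (words names.toList) := by
    rw [PySem.Str.toList_join, List.map_map]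
    congr 1
    rw [show String.toList ∘ String.ofList = id from funext (fun l => String.toList_ofList (l := l)), List.map_id]
  have hstep1 : ∀ s : String,
      (if PySem.Str.isIn "- " s then PySem.Str.replace s "- " "-" else s).toList = rep1 s.toList := by
    intro s
    by_cases hin : PySem.Str.isIn "- " s = true
    · rw [if_pos hin, PySem.Str.toList_replace]
      exact replace1_eq s.toList
    · rw [if_neg (by simpa using hin)]
      have hni : ¬ (['-', ' '] <:+: s.toList) := by
        rw [← PySem.Chars.isIn_eq_false_iff]
        simpa [PySem.Str.isIn] using hin
      exact (rep1_id_of_no _ hni).symm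
  have hstep2 : ∀ s : String,
      (if PySem.Str.isIn " -" s then PySem.Str.replace s " -" "-" else s).toList = rep2 s.toList := by
    intro s
    by_cases hin : PySem.Str.isIn " -" s = true
    · rw [if_pos hin, PySem.Str.toList_replace]
      exact replace2_eq s.toList
    · rw [if_neg (by simpa using hin)]
      have hni : ¬ ([' ', '-'] <:+: s.toList) := by
        rw [← PySem.Chars.isIn_eq_false_iff]
        simpa [PySem.Str.isIn] using hin
      exact (rep2_id_of_no _ hni).symm
  have hprop := words_prop names.toList
  simp only [formatting]
  rw [hstep2, hstep1, hsplit, hfilter, hjoin, rep1_join _ hprop, rep2_glue1 _ hprop]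


theorem glue_cons_token (c : Char) (w : List Char) (ws : List (List Char)) (hw : w ≠ []) :
    glue ((c :: w) :: ws) = c :: glue (w :: ws) := by
  obtain ⟨b, l, rfl⟩ : ∃ b l, w = b :: l := by
    cases w with
    | nil => exact absurd rfl hw
    | cons b l => exact ⟨b, l, rfl⟩
  cases ws with
  | nil => simp [glue]
  | cons v ws' =>
    simp only [glue]
    rw [show sepOf (c :: b :: l) v = sepOf (b :: l) v from by
      simp [sepOf, List.getLast?_cons_cons]]
    simp

theorem run_main : ∀ (n : Nat) (cs : List Char), cs.length ≤ n →
    ((∀ x : Char, x ≠ ' ' →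
      run (some x) true cs = sepX x (words cs) ++ glue (words cs) ∧
      run (some x) false cs = (if cs.head? = some ' ' then sepX x (words cs) else []) ++ glue (words cs)) ∧
    (∀ pend : Bool, run none pend cs = glue (words cs))) := by
  intro n
  induction n with
  | zero =>
    intro cs h
    have : cs = [] := List.length_eq_zero_iff.1 (Nat.le_zero.1 h)
    subst this
    constructor
    · intro x hx
      constructor <;> simp [run, words_nil, glue, sepX]
    · intro pend
      simp [run, words_nil, glue]
  | succ n ih =>
    intro cs hlen
    cases cs with
    | nil =>
      constructor
      · intro x hx
        constructor <;> simp [run, words_nil, glue, sepX]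
      · intro pend
        simp [run, words_nil, glue]
    | cons c t =>
      have hlt : t.length ≤ n := by simp at hlen; omega
      by_cases hc : c = ' '
      · subst hc
        have iht := ih t hlt
        constructor
        · intro x hx
          have hA := (iht.1 x hx).1
          constructor
          · rw [show run (some x) true (' ' :: t) = run (some x) true t from by simp [run]]
            rw [hA, words_space]
          · rw [show run (some x) false (' ' :: t) = run (some x) true t from by simp [run]]
            rw [hA, words_space]
            simp
        · intro pend
          rw [show run none pend (' ' :: t) = run none false t from by simp [run]]
          rw [iht.2 false, words_space]
      · have hK : c :: run (some c) false t = glue (words (c :: t)) := by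
          cases t with
          | nil => simp [run, words_single c hc, glue]
          | cons d t' =>
            by_cases hd : d = ' '
            · subst hd
              have hlt' : t'.length ≤ n := by simp at hlen; omega
              have hA := ((ih t' hlt').1 c hc).1
              rw [show run (some c) false (' ' :: t') = run (some c) true t' from by simp [run]]
              rw [hA, words_c_space c t' hc]
              rcases hw : words t' with _ | ⟨v, ws⟩
              · simp [glue, sepX]
              · simp only [glue]
                rw [show sepX c (v :: ws) = sepOf [c] v from by simp [sepX, sepOf]]
                simp
            · have hB := ((ih (d :: t') hlt).1 c hc).2
              obtain ⟨w', ws', hws⟩ := words_cons_shape d t' hd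
              rw [hB, if_neg (by simp [hd])]
              rw [words_cc c d t' hc hd _ _ hws, hws, glue_cons_token c (d :: w') ws' (by simp)]
              simp
        constructor
        · intro x hx
          constructor
          · by_cases hcm : c = '-'
            · subst hcm
              rw [show run (some x) true ('-' :: t) = '-' :: run (some '-') false t from by simp [run]]
              rw [hK]
              obtain ⟨w', ws', hws⟩ := words_cons_shape '-' t (by decide)
              rw [hws]
              simp [sepX]
            · by_cases hxm : x = '-'
              · subst hxm
                rw [show run (some '-') true (c :: t) = c :: run (some c) false t from by
                  simp [run, hc, hcm]]
                rw [hK]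
                obtain ⟨w', ws', hws⟩ := words_cons_shape c t hc
                rw [hws]
                simp [sepX]
              · rw [show run (some x) true (c :: t) = ' ' :: c :: run (some c) false t from by
                  simp [run, hc, hcm, hxm]]
                rw [hK]
                obtain ⟨w', ws', hws⟩ := words_cons_shape c t hc
                rw [hws]
                simp [sepX, hxm, hcm]
          · rw [if_neg (by simp [hc])]
            by_cases hcm : c = '-'
            · subst hcm
              rw [show run (some x) false ('-' :: t) = '-' :: run (some '-') false t from by
                simp [run]]
              simpa using hK
            · rw [show run (some x) false (c :: t) = c :: run (some c) false t from by
                simp [run, hc, hcm]]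
              simpa using hK
        · intro pend
          rw [show run none pend (c :: t) = c :: run (some c) false t from by simp [run, hc]]
          exact hK

theorem foldl_run : ∀ (cs : List Char) (out : List Char) (pend : Bool),
    (pend = true → out ≠ []) →
    (cs.foldl altStep (out, pend)).1 = out ++ run out.getLast? pend cs := by
  intro cs
  induction cs with
  | nil =>
    intro out pend _
    simp [run]
  | cons c t ih =>
    intro out pend hp
    rw [List.foldl_cons]
    by_cases hc : c = ' '
    · subst hc
      by_cases hout : out = []
      · have hpend : pend = false := by
          cases pend with
          | false => rfl
          | true => exact absurd hout (hp rfl)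
        subst hpend; subst hout
        rw [show altStep ([], false) ' ' = ([], false) from by simp [altStep]]
        rw [ih [] false (by simp)]
        simp [run]
      · rw [show altStep (out, pend) ' ' = (out, true) from by simp [altStep, hout]]
        rw [ih out true (fun _ => hout)]
        obtain ⟨x, hx⟩ : ∃ x, out.getLast? = some x := by
          cases hgl : out.getLast? with
          | none => exact absurd (List.getLast?_eq_none_iff.1 hgl) hout
          | some x => exact ⟨x, rfl⟩
        rw [hx, show run (some x) pend (' ' :: t) = run (some x) true t from by simp [run]]
    · by_cases hcm : c = '-'
      · subst hcm
        rw [show altStep (out, pend) '-' = (out ++ ['-'], false) from by simp [altStep, hc]]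
        rw [ih _ false (by simp)]
        cases hgl : out.getLast? with
        | none =>
          have : out = [] := List.getLast?_eq_none_iff.1 hgl
          subst this
          simp [run]
        | some x =>
          simp [run]
      · by_cases hpend : pend = true
        · have hout : out ≠ [] := hp hpend
          subst hpend
          obtain ⟨x, hx⟩ : ∃ x, out.getLast? = some x := by
            cases hgl : out.getLast? with
            | none => exact absurd (List.getLast?_eq_none_iff.1 hgl) hout
            | some x => exact ⟨x, rfl⟩
          by_cases hxm : x = '-'
          · rw [show altStep (out, true) c = (out ++ [c], false) from by
              simp [altStep, hc, hcm, hx, hxm]]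
            rw [ih _ false (by simp), hx]
            rw [show run (some x) true (c :: t) = c :: run (some c) false t from by
              simp [run, hc, hcm, hxm]]
            simp
          · rw [show altStep (out, true) c = (out ++ [' ', c], false) from by
              simp [altStep, hc, hcm, hx, hxm]]
            rw [ih _ false (by simp), hx]
            rw [show run (some x) true (c :: t) = ' ' :: c :: run (some c) false t from by
              simp [run, hc, hcm, hxm]]
            rw [show (out ++ [' ', c]).getLast? = some c from by simp]
            simp
        · have hpf : pend = false := by simpa using hpend
          subst hpf
          rw [show altStep (out, false) c = (out ++ [c], false) from by simp [altStep, hc, hcm]]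
          rw [ih _ false (by simp)]
          cases hgl : out.getLast? with
          | none =>
            have : out = [] := List.getLast?_eq_none_iff.1 hgl
            subst this
            simp [run, hc]
          | some x =>
            simp [run, hc, hcm]

theorem formatting_alt_toList (names : String) :
    (formatting_alt names).toList = glue (words names.toList) := by
  rw [formatting_alt, String.toList_ofList]
  rw [foldl_run names.toList [] false (by simp)]
  simp only [List.nil_append, List.getLast?_nil]
  exact (run_main names.toList.length names.toList le_rfl).2 false

theorem formatting_spec : Claim_equal_formatting := by
  unfold Claim_equal_formatting
  intro names _
  unfold Spec_formatting
  apply String.toList_inj.mp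
  rw [formatting_toList, formatting_alt_toList]
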